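-- pv_equiv track=rewrite | github.com/aap01/hacker-rank | sansa_and_xor.py | sansaXor
-- ===== SOURCE A (Python) =====
-- def sansaXor(arr):
--     # Write your code here
--     # [1, 2, 3, 4]
--     # 1, 2, 3, 4
--     # (1, 2), (2, 3), (3, 4)
--     # (1, 2, 3), (2, 3, 4)
--     # (1, 2, 3, 4)
--
--     # 1, 2, 3, 4, 5
--     # (1, 2), (2, 3), (3, 4), (4, 5)
--     # (1, 2, 3), (2, 3, 4), (3, 4, 5)
--     # (1, 2, 3, 4), (2, 3, 4, 5)
--     # (1, 2, 3, 4, 5)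
--     # Number of occurences of values at even index is odd
--
--     lenA = len(arr)
--     if lenA % 2 == 0:
--         return 0
--     i = 0
--     res = 0
--     while i < lenA:
--         res ^= arr[i]
--         i += 2
--     return res
-- ===== SOURCE B (Python) =====
-- def sansaXor(arr):
--     # Brute force: XOR together the XOR of every contiguous subarray,
--     # enumerating start index i and extending end index j with a running xor.
--     n = len(arr)
--     res = 0
--     for i in range(n):
--         cur = 0
--         for j in range(i, n):
--             cur ^= arr[j]
--             res ^= cur
--     return res
-- ===== Notes on version B (the rewrite author's own statement) =====
-- stated objective: alternative
-- what changed: Replaces A's even-index parity closed form with a direct enumeration of all contiguous subarrays, accumulating each subarray's XOR via a running inner accumulator.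
import Mathlib
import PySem

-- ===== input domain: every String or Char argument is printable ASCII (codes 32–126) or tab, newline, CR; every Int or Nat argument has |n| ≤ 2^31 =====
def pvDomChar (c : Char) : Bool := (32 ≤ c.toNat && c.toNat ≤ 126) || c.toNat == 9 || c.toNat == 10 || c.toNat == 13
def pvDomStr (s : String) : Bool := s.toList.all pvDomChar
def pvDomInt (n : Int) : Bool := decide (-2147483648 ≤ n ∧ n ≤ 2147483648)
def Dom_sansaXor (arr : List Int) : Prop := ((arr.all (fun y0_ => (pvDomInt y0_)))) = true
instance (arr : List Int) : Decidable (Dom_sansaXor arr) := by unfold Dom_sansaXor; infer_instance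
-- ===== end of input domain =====

-- B replaces A's even-index parity closed form by a direct O(n^2) enumeration of all
-- contiguous subarrays (alternative decomposition, not faster); proved equal on all inputs.


-- ===== PORT A =====
-- 'while i < lenA: res ^= arr[i]; i += 2'; i starts at 0 and only grows, so it is kept as a Nat.
def sansaXorLoop (arr : List Int) (i : Nat) (res : Int) : Int :=
  if i < arr.length then
    sansaXorLoop arr (i + 2) (PySem.Int.bxor res (PySem.List.pyGetD arr (i : Int) 0))
  else res
termination_by arr.length - i

def sansaXor (arr : List Int) : Int :=
  let lenA := arr.length
  if lenA % 2 == 0 then 0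
  else sansaXorLoop arr 0 0

-- ===== PORT B =====
-- brute force: for i in range(n): cur = 0; for j in range(i, n): cur ^= arr[j]; res ^= cur
def sansaXor_alt (arr : List Int) : Int :=
  let n : Int := arr.length
  (PySem.List.pyRange 0 n).foldl
    (fun res i =>
      ((PySem.List.pyRange i n).foldl
        (fun (st : Int × Int) j =>
          let cur := PySem.Int.bxor st.1 (PySem.List.pyGetD arr j 0)
          (cur, PySem.Int.bxor st.2 cur))
        (0, res)).2)
    0

-- ===== PRECONDITION & SPEC =====
def Spec_sansaXor (arr : List Int) (out : Int) : Prop := out = sansaXor_alt arr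
instance (arr : List Int) (out : Int) : Decidable (Spec_sansaXor arr out) := by unfold Spec_sansaXor; infer_instance

-- ===== CLAIM (what is proved, stated in full; the proofs are below) =====
def Claim_equal_sansaXor : Prop := ∀ (arr : List Int), Dom_sansaXor arr → Spec_sansaXor arr (sansaXor arr)

-- ===== LEMMAS AND PROOFS =====

-- ---- xor algebra: associativity of Python's ^ on Int, via the (sign, payload) encoding ----
def pvSgn (a : Int) : Bool := !decide (0 ≤ a)
def pvPay (a : Int) : Nat := if 0 ≤ a then a.toNat else (-a - 1).toNat
def pvDec (s : Bool) (n : Nat) : Int := if s then -(n : Int) - 1 else (n : Int)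

theorem bxor_eq_dec (a b : Int) :
    PySem.Int.bxor a b = pvDec (xor (pvSgn a) (pvSgn b)) (pvPay a ^^^ pvPay b) := by
  unfold PySem.Int.bxor pvDec pvSgn pvPay
  by_cases ha : 0 ≤ a <;> by_cases hb : 0 ≤ b <;> simp [ha, hb]

theorem pvSgn_dec (s : Bool) (n : Nat) : pvSgn (pvDec s n) = s := by
  unfold pvSgn pvDec; cases s <;> simp_all <;> omega

theorem pvPay_dec (s : Bool) (n : Nat) : pvPay (pvDec s n) = n := by
  unfold pvPay pvDec; cases s <;> simp_all <;> omega

theorem bxor_assoc (a b c : Int) :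
    PySem.Int.bxor (PySem.Int.bxor a b) c = PySem.Int.bxor a (PySem.Int.bxor b c) := by
  rw [bxor_eq_dec a b, bxor_eq_dec b c, bxor_eq_dec (pvDec _ _) c, bxor_eq_dec a (pvDec _ _),
    pvSgn_dec, pvPay_dec, pvSgn_dec, pvPay_dec, Bool.xor_assoc, Nat.xor_assoc]

theorem zero_bxor (a : Int) : PySem.Int.bxor 0 a = a := by
  rw [PySem.Int.bxor_comm, PySem.Int.bxor_zero]

theorem bxor_cancel (a b : Int) : PySem.Int.bxor a (PySem.Int.bxor a b) = b := by
  rw [← bxor_assoc, PySem.Int.bxor_self, zero_bxor]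

-- ---- the inner loop of B over a plain list ----
def innerP : Int → List Int → Int
  | _, [] => 0
  | c, a :: l => PySem.Int.bxor (PySem.Int.bxor c a) (innerP (PySem.Int.bxor c a) l)

theorem inner_fold (l : List Int) : ∀ c r : Int,
    (l.foldl (fun (st : Int × Int) a =>
        (PySem.Int.bxor st.1 a, PySem.Int.bxor st.2 (PySem.Int.bxor st.1 a))) (c, r)).2
      = PySem.Int.bxor r (innerP c l) := by
  induction l with
  | nil => intro c r; simp [innerP, PySem.Int.bxor_zero]
  | cons a l ih =>
      intro c r
      simp only [List.foldl_cons, innerP]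
      rw [ih, bxor_assoc]

-- ---- index fold over pyRange = fold over the dropped suffix ----
theorem foldl_pyRange_getD {β : Type} (f : β → Int → β) (arr : List Int) :
    ∀ (m k : Nat), arr.length - k = m → k ≤ arr.length → ∀ b : β,
      (PySem.List.pyRange (k : Int) (arr.length : Int)).foldl
          (fun acc j => f acc (PySem.List.pyGetD arr j 0)) b
        = (arr.drop k).foldl f b := by
  intro m
  induction m with
  | zero =>
      intro k hm hk b
      have hk' : k = arr.length := by omega
      subst hk'
      rw [PySem.List.pyRange_one_eq_nil (by omega)]
      simp
  | succ m ih =>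
      intro k hm hk b
      have hlt : k < arr.length := by omega
      rw [PySem.List.pyRange_one_cons (by exact_mod_cast hlt)]
      simp only [List.foldl_cons]
      have hget : PySem.List.pyGetD arr (k : Int) 0 = arr[k] :=
        PySem.List.pyGetD_eq_getElem arr 0 (by positivity) (by exact_mod_cast hlt)
      have : ((k : Int) + 1) = ((k + 1 : Nat) : Int) := by push_cast; ring
      rw [hget, this, ih (k + 1) (by omega) (by omega),
        List.drop_eq_getElem_cons hlt]
      rfl

-- ---- the outer loop of B ----
def pvS : List Int → Int
  | [] => 0
  | a :: l => PySem.Int.bxor (innerP 0 (a :: l)) (pvS l)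

theorem pvS_drop (arr : List Int) (k : Nat) (hlt : k < arr.length) :
    pvS (arr.drop k) = PySem.Int.bxor (innerP 0 (arr.drop k)) (pvS (arr.drop (k + 1))) := by
  rw [List.drop_eq_getElem_cons hlt]
  rfl

theorem outer_fold (arr : List Int) :
    ∀ (m k : Nat), arr.length - k = m → k ≤ arr.length → ∀ r : Int,
      (PySem.List.pyRange (k : Int) (arr.length : Int)).foldl
          (fun res i => PySem.Int.bxor res (innerP 0 (arr.drop i.toNat))) r
        = PySem.Int.bxor r (pvS (arr.drop k)) := by
  intro m
  induction m with
  | zero =>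
      intro k hm hk r
      have hk' : k = arr.length := by omega
      subst hk'
      rw [PySem.List.pyRange_one_eq_nil (by omega)]
      simp [pvS, PySem.Int.bxor_zero]
  | succ m ih =>
      intro k hm hk r
      have hlt : k < arr.length := by omega
      rw [PySem.List.pyRange_one_cons (by exact_mod_cast hlt)]
      simp only [List.foldl_cons, Int.toNat_natCast]
      have : ((k : Int) + 1) = ((k + 1 : Nat) : Int) := by push_cast; ring
      rw [this, ih (k + 1) (by omega) (by omega), pvS_drop arr k hlt, bxor_assoc]

-- ---- B's port equals pvS ----
theorem alt_eq_pvS (arr : List Int) : sansaXor_alt arr = pvS arr := by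
  unfold sansaXor_alt
  have hcong :
      (PySem.List.pyRange 0 (arr.length : Int)).foldl
        (fun res i =>
          ((PySem.List.pyRange i (arr.length : Int)).foldl
            (fun (st : Int × Int) j =>
              (PySem.Int.bxor st.1 (PySem.List.pyGetD arr j 0),
               PySem.Int.bxor st.2 (PySem.Int.bxor st.1 (PySem.List.pyGetD arr j 0))))
            (0, res)).2) 0
      = (PySem.List.pyRange 0 (arr.length : Int)).foldl
          (fun res i => PySem.Int.bxor res (innerP 0 (arr.drop i.toNat))) 0 := by
    apply PySem.List.foldl_congr_mem
    intro res i hi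
    have hmem := (PySem.List.mem_pyRange_one).1 hi
    have h0 : 0 ≤ i := hmem.1
    have hlt : i < (arr.length : Int) := hmem.2
    have hi' : PySem.List.pyRange i (arr.length : Int)
        = PySem.List.pyRange ((i.toNat : Nat) : Int) (arr.length : Int) := by
      congr 1; omega
    rw [hi']
    rw [foldl_pyRange_getD
      (fun (st : Int × Int) a =>
        (PySem.Int.bxor st.1 a, PySem.Int.bxor st.2 (PySem.Int.bxor st.1 a)))
      arr (arr.length - i.toNat) i.toNat rfl (by omega)]
    rw [inner_fold]
  rw [hcong]
  have hout := outer_fold arr arr.length 0 (by omega) (by omega) 0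
  simpa [zero_bxor] using hout

-- ---- parity closed form ----
def evIdx : List Int → Int
  | [] => 0
  | [a] => a
  | a :: _ :: l => PySem.Int.bxor a (evIdx l)

def odIdx : List Int → Int
  | [] => 0
  | [_] => 0
  | _ :: b :: l => PySem.Int.bxor b (odIdx l)

theorem ev_od_cons (l : List Int) :
    (∀ a, evIdx (a :: l) = PySem.Int.bxor a (odIdx l)) ∧ (∀ a, odIdx (a :: l) = evIdx l) := by
  induction l with
  | nil => exact ⟨fun a => by simp [evIdx, odIdx, PySem.Int.bxor_zero], fun a => by simp [evIdx, odIdx]⟩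
  | cons b l ih =>
      refine ⟨fun a => ?_, fun a => ?_⟩
      · show PySem.Int.bxor a (evIdx l) = _
        rw [ih.2 b]
      · show PySem.Int.bxor b (odIdx l) = _
        rw [ih.1 b]

theorem od_eq_ev_drop_one (l : List Int) : odIdx l = evIdx (l.drop 1) := by
  cases l with
  | nil => rfl
  | cons a l => rw [(ev_od_cons l).2 a]; rfl

theorem innerP_eq (l : List Int) : ∀ c : Int,
    innerP c l = PySem.Int.bxor (if l.length % 2 = 1 then c else 0) (innerP 0 l) := by
  induction l with
  | nil => intro c; simp [innerP]
  | cons a l ih =>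
      intro c
      have hcons : ∀ d : Int,
          innerP d (a :: l)
            = PySem.Int.bxor (PySem.Int.bxor d a) (innerP (PySem.Int.bxor d a) l) :=
        fun d => rfl
      rw [hcons c, hcons 0]
      simp only [zero_bxor]
      rw [ih (PySem.Int.bxor c a), ih a, List.length_cons]
      by_cases h : l.length % 2 = 1
      · rw [if_pos h, if_pos h, if_neg (by omega : ¬ (l.length + 1) % 2 = 1),
          bxor_cancel, zero_bxor, bxor_cancel]
      · rw [if_neg h, if_neg h, if_pos (by omega : (l.length + 1) % 2 = 1),
          zero_bxor, bxor_assoc]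

-- P l := innerP 0 l and S l = pvS l in closed form
theorem closed_forms (l : List Int) :
    innerP 0 l = (if l.length % 2 = 1 then evIdx l else odIdx l) ∧
      pvS l = (if l.length % 2 = 1 then evIdx l else 0) := by
  induction l with
  | nil => simp [innerP, pvS, odIdx]
  | cons a l ih =>
      have hP : innerP 0 (a :: l)
          = PySem.Int.bxor a (PySem.Int.bxor (if l.length % 2 = 1 then a else 0) (innerP 0 l)) := by
        have hcons : innerP 0 (a :: l)
            = PySem.Int.bxor (PySem.Int.bxor 0 a) (innerP (PySem.Int.bxor 0 a) l) := rfl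
        rw [hcons]
        simp only [zero_bxor]
        rw [innerP_eq l a]
      have hS : pvS (a :: l) = PySem.Int.bxor (innerP 0 (a :: l)) (pvS l) := rfl
      by_cases h : l.length % 2 = 1
      · have hP' : innerP 0 (a :: l) = innerP 0 l := by
          rw [hP, if_pos h, ← bxor_assoc, PySem.Int.bxor_self, zero_bxor]
        have hlen : ¬ (a :: l).length % 2 = 1 := by simp [List.length_cons]; omega
        constructor
        · rw [hP', ih.1, if_pos h, if_neg hlen, (ev_od_cons l).2 a]
        · rw [hS, hP', ih.1, ih.2, if_pos h, if_pos h, if_neg hlen, PySem.Int.bxor_self]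
      · have hP' : innerP 0 (a :: l) = PySem.Int.bxor a (innerP 0 l) := by
          rw [hP, if_neg h, zero_bxor]
        have hlen : (a :: l).length % 2 = 1 := by simp [List.length_cons]; omega
        constructor
        · rw [hP', ih.1, if_neg h, if_pos hlen, od_eq_ev_drop_one, (ev_od_cons l).1 a,
            od_eq_ev_drop_one]
        · rw [hS, hP', ih.1, ih.2, if_neg h, if_neg h, if_pos hlen,
            PySem.Int.bxor_zero, (ev_od_cons l).1 a, od_eq_ev_drop_one]

-- ---- A's loop ----
theorem loopA_eq (arr : List Int) :
    ∀ (m i : Nat), arr.length - i = m → ∀ res : Int,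
      sansaXorLoop arr i res = PySem.Int.bxor res (evIdx (arr.drop i)) := by
  intro m
  induction m using Nat.strong_induction_on with
  | _ m ih =>
      intro i hm res
      rw [sansaXorLoop]
      by_cases h : i < arr.length
      · rw [if_pos h]
        have hget : PySem.List.pyGetD arr (i : Int) 0 = arr[i] :=
          PySem.List.pyGetD_eq_getElem arr 0 (by positivity) (by exact_mod_cast h)
        rw [ih (arr.length - (i + 2)) (by omega) (i + 2) rfl]
        have hev : evIdx (arr.drop i) = PySem.Int.bxor arr[i] (evIdx (arr.drop (i + 2))) := by
          rw [List.drop_eq_getElem_cons h, (ev_od_cons _).1 arr[i], od_eq_ev_drop_one,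
            List.drop_drop]
        rw [hev, hget, bxor_assoc]
      · rw [if_neg h, List.drop_of_length_le (by omega)]
        simp [evIdx, PySem.Int.bxor_zero]

-- ===== VERDICT (by name: the statement is the Claim_ definition above) =====
theorem sansaXor_spec : Claim_equal_sansaXor := by
  intro arr _
  unfold Spec_sansaXor
  rw [alt_eq_pvS, (closed_forms arr).2]
  unfold sansaXor
  by_cases h : arr.length % 2 = 0
  · rw [if_pos (by simpa using h), if_neg (by omega)]
  · rw [if_neg (by simpa using h), if_pos (by omega),
      loopA_eq arr arr.length 0 (by omega) 0, zero_bxor]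
    simp
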